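-- pv_equiv track=rewrite | github.com/beginner1729/google-foobar-challenges | level_2/problem_2/solution.py | solution
-- ===== SOURCE A (Python) =====
-- def pair_wise(arr):
--     divisible_pairs = []
--     num_divisiblepair_perval = [0]*len(arr)
--
--     for pos_i, val_i in enumerate(arr):
--         for j, val_j in enumerate(arr[pos_i+1:]):
--             pos_j = pos_i + 1 + j # actual position
--             if val_j%val_i==0: # if divisible
--                 num_divisiblepair_perval[pos_i] += 1 # add one to number of pairs
--                 divisible_pairs.append((pos_i, pos_j))
--
--     return divisible_pairs, num_divisiblepair_perval
--
-- def solution(arr):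
--     """
--     The problem statement is to find number of magic triplets (a_i, b_j, c_k) from interger array arr
--     So that a_i divides b_j and b_j divides c_k where i < j < k.
--     To do that we find all pairs of integers (x_i,y_j),
--     where x_i divides y_j where j > i, and keep a count of all y_j that divide a particular x_i
--
--     Now to find all magic triplets that start with (x_i, y_j) we simply add
--     the number of divisible pairs that begin y_j, hence summing up all the possible
--     (x_i, y_j) we get the possible magic triplets
--     """
--     if len(arr) < 3:
--         return 0
--     # divisible pair num divisible
--     divisible_pairs, num_divisible = pair_wise(arr)
--     # sum up for all the pairs
--     total_sum = 0
--     for val1, val2 in divisible_pairs: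
--         total_sum += num_divisible[val2]
--     return total_sum
-- ===== SOURCE B (Python) =====
-- def solution(arr):
--     if len(arr) < 3:
--         return 0
--     n = len(arr)
--     total = 0
--     for j in range(n):
--         incoming = sum(1 for i in range(j) if arr[j] % arr[i] == 0)
--         outgoing = sum(1 for k in range(j + 1, n) if arr[k] % arr[j] == 0)
--         total += incoming * outgoing
--     return total
-- ===== Notes on version B (the rewrite author's own statement) =====
-- stated objective: simpler
-- what changed: Instead of materializing the list of divisible pairs plus a per-index pair counter and then summing counter lookups over that list, B pivots on the middle element: one pass over j summing (count of divisors before j) * (count of multiples after j); no intermediate list is built.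
import Mathlib
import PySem

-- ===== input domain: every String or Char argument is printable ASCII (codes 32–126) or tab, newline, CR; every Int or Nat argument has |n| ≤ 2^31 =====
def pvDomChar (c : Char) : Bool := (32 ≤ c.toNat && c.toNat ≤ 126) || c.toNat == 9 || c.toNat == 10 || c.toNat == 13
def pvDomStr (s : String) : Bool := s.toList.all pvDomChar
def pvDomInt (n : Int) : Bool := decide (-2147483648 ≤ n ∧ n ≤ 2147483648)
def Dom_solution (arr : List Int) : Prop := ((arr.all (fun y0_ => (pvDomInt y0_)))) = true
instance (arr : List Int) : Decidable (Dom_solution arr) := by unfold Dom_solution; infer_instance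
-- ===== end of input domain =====

-- B replaces A's materialized pair list + per-index pair counter by a single pass over the
-- middle element, summing (divisors before j) * (multiples after j); simpler, O(1) extra space.

-- ===== PORT A =====
-- pos_i (pv.1) comes from enumerate, so it is always ≥ 0 and .toNat is exact here
def pairWise (arr : List Int) : List (Int × Int) × List Int :=
  (PySem.List.enumerate arr).foldl
    (fun st pv =>
      (PySem.List.enumerate (PySem.List.slice arr (some (pv.1 + 1)))).foldl
        (fun st2 jv =>
          if PySem.Int.mod jv.2 pv.2 == 0 then
            (st2.1 ++ [(pv.1, pv.1 + 1 + jv.1)], st2.2.modify pv.1.toNat (· + 1))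
          else st2)
        st)
    ([], List.replicate arr.length 0)

def solution (arr : List Int) : Int :=
  if PySem.List.len arr < 3 then 0
  else
    let r := pairWise arr
    r.1.foldl (fun s p => s + PySem.List.pyGetD r.2 p.2 0) 0

-- ===== PORT B =====
def solution_alt (arr : List Int) : Int :=
  if PySem.List.len arr < 3 then 0
  else
    let n := PySem.List.len arr
    (PySem.List.pyRange 0 n).foldl
      (fun total j =>
        let incoming : Int :=
          ((PySem.List.pyRange 0 j).countP
            (fun i => PySem.Int.mod (PySem.List.pyGetD arr j 0) (PySem.List.pyGetD arr i 0) == 0) : Nat)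
        let outgoing : Int :=
          ((PySem.List.pyRange (j + 1) n).countP
            (fun k => PySem.Int.mod (PySem.List.pyGetD arr k 0) (PySem.List.pyGetD arr j 0) == 0) : Nat)
        total + incoming * outgoing)
      0

-- ===== PRECONDITION & SPEC =====
-- Pre_ excludes exactly the inputs where A raises ZeroDivisionError: a 0 used as a divisor,
-- i.e. a 0 anywhere but the last position of a list of length ≥ 3 (B raises there too).
def Pre_solution (arr : List Int) : Prop := arr.length < 3 ∨ (0 : Int) ∉ arr.dropLast
instance (arr : List Int) : Decidable (Pre_solution arr) := by unfold Pre_solution; infer_instance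
def pvWitness_solution : List Int := [1, 2, 4]
def Spec_solution (arr : List Int) (out : Int) : Prop := out = solution_alt arr
instance (arr : List Int) (out : Int) : Decidable (Spec_solution arr out) := by unfold Spec_solution; infer_instance

-- ===== CLAIM (what is proved, stated in full; the proofs are below) =====
def Claim_equal_solution : Prop := ∀ (arr : List Int), Dom_solution arr → Pre_solution arr → Spec_solution arr (solution arr)

-- ===== LEMMAS AND PROOFS =====

-- the divisibility test both programs make, on positions
def dv (arr : List Int) (i j : Int) : Bool :=
  PySem.Int.mod (PySem.List.pyGetD arr j 0) (PySem.List.pyGetD arr i 0) == 0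

-- number of multiples of arr[j] strictly after j
def outg (arr : List Int) (j : Int) : Int :=
  ((PySem.List.pyRange (j + 1) (PySem.List.len arr)).countP (fun k => dv arr j k) : Nat)

-- per outer index i: the count A's inner loop adds at position i
def cntA (arr : List Int) (i : Int) : Int :=
  ((PySem.List.enumerate (PySem.List.slice arr (some (i + 1)))).countP
    (fun jv => PySem.Int.mod jv.2 (PySem.List.pyGetD arr i 0) == 0) : Nat)

lemma modify_add_zero (nd : List Int) (k : Nat) : nd.modify k (· + (0 : Int)) = nd := by
  refine List.ext_getElem? fun j => ?_
  rw [List.getElem?_modify]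
  cases nd[j]? <;> simp

lemma modify_add_add (nd : List Int) (k : Nat) (c : Int) :
    (nd.modify k (· + 1)).modify k (· + c) = nd.modify k (· + (c + 1)) := by
  refine List.ext_getElem? fun j => ?_
  rw [List.getElem?_modify, List.getElem?_modify, List.getElem?_modify]
  cases nd[j]? with
  | none => rfl
  | some a => by_cases h : k = j <;> simp [h] <;> ring

lemma inner_fold (arr : List Int) (i vi : Int) (l : List (Int × Int)) :
    ∀ (dp : List (Int × Int)) (nd : List Int),
    l.foldl
      (fun st2 jv =>
        if PySem.Int.mod jv.2 vi == 0 then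
          (st2.1 ++ [(i, i + 1 + jv.1)], st2.2.modify i.toNat (· + 1))
        else st2)
      (dp, nd)
    = (dp ++ (l.filter (fun jv => PySem.Int.mod jv.2 vi == 0)).map (fun jv => (i, i + 1 + jv.1)),
       nd.modify i.toNat (· + (l.countP (fun jv => PySem.Int.mod jv.2 vi == 0) : Int))) := by
  induction l with
  | nil =>
    intro dp nd
    simp only [List.foldl_nil, List.filter_nil, List.map_nil, List.append_nil,
      List.countP_nil, Nat.cast_zero, modify_add_zero]
  | cons a t ih =>
    intro dp nd
    simp only [List.foldl_cons]
    cases h : (PySem.Int.mod a.2 vi == 0) with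
    | true =>
      rw [if_pos rfl, ih, modify_add_add]
      simp [List.filter_cons, List.countP_cons, h, Nat.cast_add]
    | false =>
      rw [if_neg (fun hc => by simp at hc), ih]
      simp [List.filter_cons, List.countP_cons, h]

-- pairWise decomposed into its two accumulators
lemma pairWise_eq (arr : List Int) :
    pairWise arr =
      ((PySem.List.enumerate arr).flatMap
         (fun pv =>
           ((PySem.List.enumerate (PySem.List.slice arr (some (pv.1 + 1)))).filter
              (fun jv => PySem.Int.mod jv.2 pv.2 == 0)).map (fun jv => (pv.1, pv.1 + 1 + jv.1))),
       (PySem.List.enumerate arr).foldl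
         (fun nd pv =>
           nd.modify pv.1.toNat
             (· + ((PySem.List.enumerate (PySem.List.slice arr (some (pv.1 + 1)))).countP
                     (fun jv => PySem.Int.mod jv.2 pv.2 == 0) : Int)))
         (List.replicate arr.length 0)) := by
  unfold pairWise
  have h : (fun (st : List (Int × Int) × List Int) (pv : Int × Int) =>
      (PySem.List.enumerate (PySem.List.slice arr (some (pv.1 + 1)))).foldl
        (fun st2 jv =>
          if PySem.Int.mod jv.2 pv.2 == 0 then
            (st2.1 ++ [(pv.1, pv.1 + 1 + jv.1)], st2.2.modify pv.1.toNat (· + 1))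
          else st2)
        st)
      = fun st pv =>
        (st.1 ++ ((PySem.List.enumerate (PySem.List.slice arr (some (pv.1 + 1)))).filter
              (fun jv => PySem.Int.mod jv.2 pv.2 == 0)).map (fun jv => (pv.1, pv.1 + 1 + jv.1)),
         st.2.modify pv.1.toNat
           (· + ((PySem.List.enumerate (PySem.List.slice arr (some (pv.1 + 1)))).countP
                   (fun jv => PySem.Int.mod jv.2 pv.2 == 0) : Int))) := by
    funext st pv
    obtain ⟨dp, nd⟩ := st
    exact inner_fold arr pv.1 pv.2 _ dp nd
  rw [h]
  rw [PySem.List.foldl_prod_mk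
    (f := fun dp (pv : Int × Int) =>
      dp ++ ((PySem.List.enumerate (PySem.List.slice arr (some (pv.1 + 1)))).filter
          (fun jv => PySem.Int.mod jv.2 pv.2 == 0)).map (fun jv => (pv.1, pv.1 + 1 + jv.1)))
    (g := fun nd (pv : Int × Int) =>
      List.modify nd pv.1.toNat
        (· + ((PySem.List.enumerate (PySem.List.slice arr (some (pv.1 + 1)))).countP
                (fun jv => PySem.Int.mod jv.2 pv.2 == 0) : Int)))]
  rw [PySem.List.foldl_append_eq_flatMap]
  simp

-- fold of modifies over a strictly increasing list of nonnegative indices, looked up at k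
lemma fold_modify_mem (C : Int → Int) (l : List Int) :
    ∀ (nd : List Int) (k : Nat), l.Pairwise (· < ·) → (∀ x ∈ l, 0 ≤ x) → k < nd.length →
    (l.foldl (fun nd j => nd.modify j.toNat (· + C j)) nd).getD k 0 =
      if (k : Int) ∈ l then nd.getD k 0 + C k else nd.getD k 0 := by
  induction l with
  | nil => intro nd k _ _ _; simp
  | cons j t ih =>
    intro nd k hpw hnn hk
    simp only [List.foldl_cons, List.mem_cons]
    have h0j : (0 : Int) ≤ j := hnn j (by simp)
    have hlen : k < (nd.modify j.toNat (· + C j)).length := by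
      simpa [List.length_modify] using hk
    rw [ih _ k hpw.of_cons (fun x hx => hnn x (List.mem_cons_of_mem _ hx)) hlen]
    by_cases hkj : (k : Int) = j
    · have hjk : j.toNat = k := by omega
      have hkt : (k : Int) ∉ t := by
        intro hmem
        have := (List.pairwise_cons.mp hpw).1 _ hmem
        omega
      rw [if_neg hkt, if_pos (Or.inl hkj)]
      rw [List.getD_eq_getElem?_getD, List.getElem?_modify, hjk,
        List.getElem?_eq_getElem hk]
      simp [← hkj, List.getD_eq_getElem?_getD, List.getElem?_eq_getElem hk]
    · have hne : j.toNat ≠ k := by omega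
      have hgd : (nd.modify j.toNat (· + C j)).getD k 0 = nd.getD k 0 := by
        simp [List.getD_eq_getElem?_getD, List.getElem?_modify, hne]
      rw [hgd]
      by_cases hmem : (k : Int) ∈ t
      · rw [if_pos hmem, if_pos (Or.inr hmem)]
      · rw [if_neg hmem, if_neg (by rintro (h | h) <;> [exact hkj h; exact hmem h])]

-- the second component of pairWise, looked up at k < n, is cntA k
lemma nd_char (arr : List Int) (k : Nat) (hk : k < arr.length) :
    (pairWise arr).2.getD k 0 = cntA arr (k : Int) := by
  rw [pairWise_eq]
  dsimp only
  rw [PySem.List.enumerate_eq_map_pyRange arr 0, List.foldl_map]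
  have hm := fold_modify_mem
      (C := fun j => (((PySem.List.enumerate (PySem.List.slice arr (some (j + 1)))).countP
          (fun jv => PySem.Int.mod jv.2 (PySem.List.pyGetD arr j 0) == 0) : Nat) : Int))
      (PySem.List.pyRange 0 (PySem.List.len arr)) (List.replicate arr.length 0) k
      ?_ ?_ ?_
  · dsimp only
    rw [hm, if_pos (PySem.List.mem_pyRange_one.mpr
        ⟨Int.natCast_nonneg k, by simp only [PySem.List.len]; exact_mod_cast hk⟩)]
    rw [List.getD_replicate _ hk, zero_add]
    rfl
  · simp only [PySem.List.len, PySem.List.pyRange_zero_natCast]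
    exact List.pairwise_map.mpr (List.pairwise_lt_range.imp (by exact_mod_cast ·))
  · intro x hx
    exact (PySem.List.mem_pyRange_one.mp hx).1
  · simpa using hk

-- cntA equals outg
lemma cntA_eq_outg (arr : List Int) (k : Nat) (hk : k < arr.length) :
    cntA arr (k : Int) = outg arr (k : Int) := by
  unfold cntA outg dv
  have hc : ((k : Int) + 1) = ((k + 1 : Nat) : Int) := by push_cast; ring
  rw [hc, PySem.List.slice_from_natCast]
  have h1 : (PySem.List.enumerate (List.drop (k+1) arr)).countP
      (fun jv => PySem.Int.mod jv.2 (PySem.List.pyGetD arr (k : Int) 0) == 0)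
      = (List.drop (k+1) arr).countP
          (fun v => PySem.Int.mod v (PySem.List.pyGetD arr (k : Int) 0) == 0) := by
    conv_rhs => rw [← PySem.List.map_snd_enumerate (List.drop (k+1) arr) 0]
    rw [List.countP_map]
    rfl
  rw [h1]
  have h0 := PySem.List.map_pyGetD_pyRange_zero arr (0 : Int)
  have hsplit := PySem.List.pyRange_one_append 0 ((k+1 : Nat) : Int) (PySem.List.len arr)
      (by positivity) (by simp only [PySem.List.len]; exact_mod_cast hk)
  rw [hsplit, List.map_append] at h0
  have hlen1 : ((PySem.List.pyRange 0 ((k+1:Nat):Int)).map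
      (fun j => PySem.List.pyGetD arr j 0)).length = k + 1 := by
    rw [PySem.List.pyRange_zero_natCast]; simp
  have hD := List.drop_left
      (l₁ := (PySem.List.pyRange 0 ((k+1:Nat):Int)).map (fun j => PySem.List.pyGetD arr j 0))
      (l₂ := (PySem.List.pyRange ((k+1 : Nat) : Int) (PySem.List.len arr)).map
          (fun j => PySem.List.pyGetD arr j 0))
  rw [hlen1, h0] at hD
  rw [hD, List.countP_map]
  simp [Function.comp_def]

-- list/Finset bridges used by the sum argument
lemma list_range_sum (n : Nat) (f : Nat → Int) :
    ((List.range n).map f).sum = ∑ i ∈ Finset.range n, f i := rfl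

lemma sum_flatMap' {α : Type} (g : α → List Int) (l : List α) :
    (l.flatMap g).sum = (l.map (fun a => (g a).sum)).sum := by
  induction l with
  | nil => rfl
  | cons a t ih => simp [List.flatMap_cons, ih]

lemma sum_map_filter_ite {α : Type} (l : List α) (p : α → Bool) (f : α → Int) :
    ((l.filter p).map f).sum = (l.map (fun x => if p x then f x else 0)).sum := by
  induction l with
  | nil => rfl
  | cons a t ih => by_cases h : p a <;> simp [List.filter_cons, h, ih]

-- A's inner contribution for outer index iN, as a Finset sum over the later positions
lemma inner_sum_eq (arr : List Int) (iN : Nat) :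
    (((PySem.List.enumerate (PySem.List.slice arr (some ((iN : Int) + 1)))).filter
         (fun jv => PySem.Int.mod jv.2 (PySem.List.pyGetD arr (iN : Int) 0) == 0)).map
       (fun jv => PySem.List.pyGetD (pairWise arr).2 ((iN : Int) + 1 + jv.1) 0)).sum
    = ∑ t ∈ Finset.Ico (iN + 1) arr.length,
        (if dv arr (iN : Int) (t : Int) = true then outg arr (t : Int) else 0) := by
  have hc : ((iN : Int) + 1) = ((iN + 1 : Nat) : Int) := by push_cast; ring
  rw [hc, PySem.List.slice_from_natCast]
  rw [PySem.List.enumerate_eq_map_pyRange (List.drop (iN+1) arr) 0]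
  rw [List.filter_map, List.map_map]
  have hlt : PySem.List.len (List.drop (iN+1) arr) = ((arr.length - (iN+1) : Nat) : Int) := by
    simp [PySem.List.len]
  rw [hlt, PySem.List.pyRange_zero_natCast, List.filter_map, List.map_map]
  rw [sum_map_filter_ite, list_range_sum]
  rw [Finset.sum_Ico_eq_sum_range
      (fun t => if dv arr (iN : Int) (t : Int) = true then outg arr (t : Int) else 0)
      (iN + 1) arr.length]
  refine Finset.sum_congr rfl fun jN hj => ?_
  have hjm : jN < arr.length - (iN + 1) := Finset.mem_range.mp hj
  have e1 : PySem.List.pyGetD (List.drop (iN+1) arr) ((jN : Nat) : Int) 0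
      = PySem.List.pyGetD arr ((iN + 1 + jN : Nat) : Int) 0 := by
    rw [PySem.List.pyGetD_natCast, PySem.List.pyGetD_natCast]
    simp [List.getD_eq_getElem?_getD, List.getElem?_drop]
  have e2 : ((iN + 1 : Nat) : Int) + (jN : Int) = ((iN + 1 + jN : Nat) : Int) := by
    push_cast; ring
  simp only [Function.comp_apply, Function.comp_def]
  rw [e1, e2, PySem.List.pyGetD_natCast ((pairWise arr).2),
    nd_char arr _ (by omega), cntA_eq_outg arr _ (by omega)]
  unfold dv
  rfl

-- B's summand for index t, expanded to the incoming indices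
lemma alt_sum (arr : List Int) (t : Nat) :
    (((PySem.List.pyRange 0 (t : Int)).countP
        (fun i => PySem.Int.mod (PySem.List.pyGetD arr (t : Int) 0)
          (PySem.List.pyGetD arr i 0) == 0) : Nat) : Int)
      * outg arr (t : Int)
    = ∑ i ∈ Finset.range t, (if dv arr (i : Int) (t : Int) = true then outg arr (t : Int) else 0) := by
  rw [PySem.List.pyRange_zero_natCast, List.countP_map]
  have hcnt : ((List.countP
        ((fun i => PySem.Int.mod (PySem.List.pyGetD arr (t : Int) 0)
          (PySem.List.pyGetD arr i 0) == 0) ∘ fun k : Nat => (k : Int)) (List.range t) : Nat) : Int)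
      = ∑ i ∈ Finset.range t, (if dv arr (i : Int) (t : Int) = true then (1 : Int) else 0) := by
    rw [← list_range_sum, ← PySem.List.sum_map_ite_one_zero]
    rfl
  rw [hcnt, Finset.sum_mul]
  refine Finset.sum_congr rfl fun i _ => ?_
  split <;> simp

lemma triangle_swap (n : Nat) (F : Nat → Nat → Int) :
    ∑ i ∈ Finset.range n, ∑ t ∈ Finset.Ico (i + 1) n, F i t
      = ∑ t ∈ Finset.range n, ∑ i ∈ Finset.range t, F i t := by
  have h1 : ∀ i : Nat, Finset.Ico (i + 1) n = (Finset.range n).filter (fun t => i < t) := by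
    intro i; ext t; simp [Finset.mem_Ico]; omega
  have h2 : ∀ t : Nat, t < n → Finset.range t = (Finset.range n).filter (fun i => i < t) := by
    intro t ht; ext i; simp; omega
  calc ∑ i ∈ Finset.range n, ∑ t ∈ Finset.Ico (i + 1) n, F i t
      = ∑ i ∈ Finset.range n, ∑ t ∈ Finset.range n, if i < t then F i t else 0 := by
        refine Finset.sum_congr rfl fun i _ => ?_
        rw [h1 i, Finset.sum_filter]
    _ = ∑ t ∈ Finset.range n, ∑ i ∈ Finset.range n, if i < t then F i t else 0 :=
        Finset.sum_comm
    _ = ∑ t ∈ Finset.range n, ∑ i ∈ Finset.range t, F i t := by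
        refine Finset.sum_congr rfl fun t ht => ?_
        rw [h2 t (Finset.mem_range.mp ht), Finset.sum_filter]

lemma main_eq (arr : List Int) : solution arr = solution_alt arr := by
  by_cases h3 : PySem.List.len arr < 3
  · unfold solution solution_alt
    rw [if_pos h3, if_pos h3]
  · unfold solution solution_alt
    rw [if_neg h3, if_neg h3]
    show ((pairWise arr).1.foldl
        (fun s p => s + PySem.List.pyGetD (pairWise arr).2 p.2 0) 0) = _
    rw [PySem.List.foldl_add]
    conv_rhs => rw [PySem.List.foldl_add]
    simp only [zero_add, List.nil_append]
    have hdp : (pairWise arr).1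
        = (PySem.List.enumerate arr).flatMap
            (fun pv =>
              ((PySem.List.enumerate (PySem.List.slice arr (some (pv.1 + 1)))).filter
                 (fun jv => PySem.Int.mod jv.2 pv.2 == 0)).map
                (fun jv => (pv.1, pv.1 + 1 + jv.1))) := by
      rw [pairWise_eq]
    rw [hdp, PySem.List.enumerate_eq_map_pyRange arr 0, List.flatMap_map,
      List.map_flatMap, sum_flatMap']
    have hlen : PySem.List.len arr = ((arr.length : Nat) : Int) := rfl
    dsimp only
    simp only [hlen, PySem.List.pyRange_zero_natCast, List.map_map]
    rw [list_range_sum, list_range_sum]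
    refine Eq.trans
      (Finset.sum_congr rfl (fun iN _ => ?_))
      (Eq.trans
        (triangle_swap arr.length
          (fun i t => if dv arr (i : Int) (t : Int) = true then outg arr (t : Int) else 0))
        (Finset.sum_congr rfl (fun t _ => ?_)))
    · simpa [Function.comp, PySem.List.len] using inner_sum_eq arr iN
    · simpa [Function.comp, outg, dv, PySem.List.len] using (alt_sum arr t).symm

-- ===== VERDICT (by name: the statement is the Claim_ definition above) =====
theorem solution_spec : Claim_equal_solution := by
  intro arr _ _
  exact main_eq arr
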